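-- pv_equiv track=rewrite | github.com/GainMarketing123/nanoclaw | scripts/migrate-drop-stale-atlas-state-mount.py | collides_with_reserved_path
-- ===== SOURCE A (Python) =====
-- import posixpath
--
-- RESERVED_CONTAINER_PATHS = [
--     "atlas-state",
--     "atlas-state/host-tasks",
-- ]
--
-- def normalize_container_path(path_value: str) -> str:
--     """
--     Normalize a container-relative POSIX path for collision comparison.
--
--     Mirrors src/mount-security.ts semantics with one defensive difference:
--     '..' segments are preserved rather than resolved.
--     """
--     if not path_value:
--         return ""
--
--     parts = []
--     for part in path_value.split(posixpath.sep):
--         if part == "" or part == ".":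
--             continue
--         parts.append(part)
--
--     normalized = posixpath.sep.join(parts)
--     if normalized == "":
--         return "."
--     if normalized != posixpath.sep and normalized.endswith(posixpath.sep):
--         return normalized[:-1]
--     return normalized
--
-- def collides_with_reserved_path(user_path: str) -> bool:
--     """Return True when a user mount path overlaps a reserved Atlas path."""
--     if not user_path:
--         return False
--
--     normalized = normalize_container_path(user_path)
--     if normalized == ".":
--         return True
--
--     for reserved in RESERVED_CONTAINER_PATHS:
--         norm_reserved = normalize_container_path(reserved)
--         if normalized == norm_reserved:
--             return True
--         if normalized.startswith(norm_reserved + "/"):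
--             return True
--         if norm_reserved.startswith(normalized + "/"):
--             return True
--
--     return False
-- ===== SOURCE B (Python) =====
-- RESERVED_CONTAINER_PATHS = [
--     "atlas-state",
--     "atlas-state/host-tasks",
-- ]
--
-- # Every reserved path lives under the reserved root "atlas-state", and that root
-- # is itself reserved, so a mount collides exactly when its first real path
-- # segment is the root (or the path has no real segment, i.e. normalizes to ".").
-- _RESERVED_ROOT = RESERVED_CONTAINER_PATHS[0]
--
--
-- def collides_with_reserved_path(user_path: str) -> bool:
--     """Return True when a user mount path overlaps a reserved Atlas path."""
--     if not user_path:
--         return False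
--     for part in user_path.split("/"):
--         if part and part != ".":
--             return part == _RESERVED_ROOT
--     return True
-- ===== Notes on version B (the rewrite author's own statement) =====
-- stated objective: simpler
-- what changed: B drops A's normalization pipeline and the loop over reserved paths entirely: since the reserved root 'atlas-state' is itself reserved and every reserved path lies under it, B scans once for the first real path segment and compares only it to the root, returning True when no real segment exists.
import Mathlib
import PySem

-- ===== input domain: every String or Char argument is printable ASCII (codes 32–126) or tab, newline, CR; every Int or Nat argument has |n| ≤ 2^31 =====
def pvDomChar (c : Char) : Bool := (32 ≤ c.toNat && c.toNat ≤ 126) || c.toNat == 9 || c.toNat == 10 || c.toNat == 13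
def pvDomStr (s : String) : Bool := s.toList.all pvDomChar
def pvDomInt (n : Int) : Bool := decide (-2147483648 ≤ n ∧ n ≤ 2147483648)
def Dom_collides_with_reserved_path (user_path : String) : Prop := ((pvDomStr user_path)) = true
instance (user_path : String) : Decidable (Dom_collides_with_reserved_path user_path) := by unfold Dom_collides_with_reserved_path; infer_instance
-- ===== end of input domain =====

-- B replaces A's normalization pipeline and reserved-path loop by a single scan for the
-- first real path segment, compared to the reserved root; same results, simpler code.

-- ===== PORT A =====
-- Strings are handled via their code-point lists with PySem.Chars (exact ASCII semantics).
def pvReservedA : List (List Char) := ["atlas-state".toList, "atlas-state/host-tasks".toList]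

def pvNormalize (path_value : List Char) : List Char :=
  if path_value = [] then []
  else
    let parts := (PySem.Chars.splitOn path_value ['/']).foldl
      (fun acc part => if part = [] || part = ['.'] then acc else acc ++ [part]) []
    let normalized := PySem.Chars.join ['/'] parts
    if normalized = [] then ['.']
    else if normalized ≠ ['/'] && PySem.Chars.endswith normalized ['/'] then
      PySem.Chars.slice normalized none (some (-1))
    else normalized

def pvLoopA (normalized : List Char) : List (List Char) → Bool
  | [] => false
  | reserved :: rs =>
    let nr := pvNormalize reserved
    if normalized = nr then true
    else if PySem.Chars.startswith normalized (nr ++ ['/']) then true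
    else if PySem.Chars.startswith nr (normalized ++ ['/']) then true
    else pvLoopA normalized rs

def collides_with_reserved_path (user_path : String) : Bool :=
  if user_path.toList = [] then false
  else
    let normalized := pvNormalize user_path.toList
    if normalized = ['.'] then true
    else pvLoopA normalized pvReservedA

-- ===== PORT B =====
def pvReservedRoot : List Char := "atlas-state".toList

-- B's for-loop with early return: find the first real segment, compare it to the root;
-- falling off the loop (no real segment) returns true.
def pvFirstRealSeg : List (List Char) → Bool
  | [] => true
  | p :: rest =>
    if p = [] || p = ['.'] then pvFirstRealSeg rest
    else p == pvReservedRoot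

def collides_with_reserved_path_alt (user_path : String) : Bool :=
  if user_path.toList = [] then false
  else pvFirstRealSeg (PySem.Chars.splitOn user_path.toList ['/'])

-- ===== PRECONDITION & SPEC =====
def Spec_collides_with_reserved_path (user_path : String) (out : Bool) : Prop := out = collides_with_reserved_path_alt user_path
instance (user_path : String) (out : Bool) : Decidable (Spec_collides_with_reserved_path user_path out) := by unfold Spec_collides_with_reserved_path; infer_instance

-- ===== CLAIM (what is proved, stated in full; the proofs are below) =====
def Claim_equal_collides_with_reserved_path : Prop := ∀ (user_path : String), Dom_collides_with_reserved_path user_path → Spec_collides_with_reserved_path user_path (collides_with_reserved_path user_path)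

-- ===== LEMMAS AND PROOFS =====

-- A's append loop builds exactly the filtered segment list.
theorem pv_foldl_filter (l : List (List Char)) (init : List (List Char)) :
    l.foldl (fun acc part => if part = [] || part = ['.'] then acc else acc ++ [part]) init
      = init ++ l.filter (fun p => !(p == [] || p == ['.'])) := by
  induction l generalizing init with
  | nil => simp
  | cons x xs ih =>
    rw [List.foldl_cons, ih, List.filter_cons]
    by_cases h1 : x = [] <;> by_cases h2 : x = ['.'] <;>
      simp [h1, h2, List.append_assoc]

-- B's early-return scan equals the head test on the filtered segment list.
theorem pv_firstRealSeg_filter (l : List (List Char)) :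
    pvFirstRealSeg l
      = (match l.filter (fun p => !(p == [] || p == ['.'])) with
         | [] => true
         | a :: _ => a == pvReservedRoot) := by
  induction l with
  | nil => rfl
  | cons x xs ih =>
    rw [List.filter_cons]
    by_cases h1 : x = [] <;> by_cases h2 : x = ['.'] <;>
      simp_all [pvFirstRealSeg]

-- Every piece produced by splitting on '/' contains no '/'.
theorem pv_go_no_slash : ∀ (fuel : Nat) (l cur : List Char) (acc : List (List Char)),
    l.length < fuel → (∀ x ∈ acc, '/' ∉ x) → '/' ∉ cur →
    ∀ x ∈ PySem.Chars.splitOn.go ['/'] fuel l cur acc, '/' ∉ x := by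
  intro fuel
  induction fuel with
  | zero => intro l cur acc h; omega
  | succ f ih =>
    intro l cur acc hlen hacc hcur
    cases l with
    | nil =>
      simp only [PySem.Chars.splitOn.go]
      intro x hx
      simp only [List.mem_reverse, List.mem_cons] at hx
      rcases hx with h | h
      · subst h; simpa using hcur
      · exact hacc x h
    | cons c rest =>
      simp only [PySem.Chars.splitOn.go]
      by_cases hc : c = '/'
      · subst hc
        rw [if_pos (by simp [List.isPrefixOf])]
        refine ih _ _ _ (by simpa using hlen) ?_ (by simp)
        intro x hx
        rcases List.mem_cons.mp hx with h | h
        · subst h; simpa using hcur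
        · exact hacc x h
      · rw [if_neg (by simp [List.isPrefixOf]; exact fun h => hc h.symm)]
        refine ih _ _ _ (by simpa using Nat.lt_of_succ_lt_succ hlen) hacc ?_
        intro hx
        rcases List.mem_cons.mp hx with h | h
        · exact hc h.symm
        · exact hcur h

theorem pv_splitOn_no_slash (cs : List Char) :
    ∀ x ∈ PySem.Chars.splitOn cs ['/'], '/' ∉ x := by
  have := pv_go_no_slash (cs.length + 1) cs [] [] (by omega) (by simp) (by simp)
  simpa [PySem.Chars.splitOn] using this

-- The first '/'-free block of a character list.
def pvFirstSeg (cs : List Char) : List Char := cs.takeWhile (fun c => c != '/')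

theorem pvFirstSeg_no_slash (a : List Char) (ha : '/' ∉ a) : pvFirstSeg a = a := by
  induction a with
  | nil => rfl
  | cons c t ih =>
    simp only [List.mem_cons, not_or] at ha
    simp [pvFirstSeg, Ne.symm ha.1] at *
    exact ih ha.2

theorem pvFirstSeg_append_of_mem (p u : List Char) (hp : '/' ∈ p) :
    pvFirstSeg (p ++ u) = pvFirstSeg p := by
  induction p with
  | nil => simp at hp
  | cons c t ih =>
    by_cases hc : c = '/'
    · subst hc; simp [pvFirstSeg]
    · simp only [List.mem_cons] at hp
      rcases hp with h | h
      · exact absurd h.symm hc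
      · simp [pvFirstSeg, hc] at ih ⊢
        exact ih h

theorem pvFirstSeg_append_slash (a t : List Char) (ha : '/' ∉ a) :
    pvFirstSeg (a ++ '/' :: t) = a := by
  induction a with
  | nil => simp [pvFirstSeg]
  | cons c s ih =>
    simp only [List.mem_cons, not_or] at ha
    simp [pvFirstSeg, Ne.symm ha.1] at ih ⊢
    exact ih ha.2

theorem pvFirstSeg_concat_slash (j : List Char) :
    pvFirstSeg (j ++ ['/']) = pvFirstSeg j := by
  by_cases hj : '/' ∈ j
  · exact pvFirstSeg_append_of_mem j _ hj
  · rw [pvFirstSeg_no_slash j hj]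
    simpa using pvFirstSeg_append_slash j [] hj

theorem pv_join_cons (a : List Char) (rest : List (List Char)) :
    PySem.Chars.join ['/'] (a :: rest)
      = a ++ (if rest = [] then [] else '/' :: PySem.Chars.join ['/'] rest) := by
  cases rest with
  | nil => simp [PySem.Chars.join, List.intercalate]
  | cons b t => simp [PySem.Chars.join, List.intercalate, List.intersperse]

theorem pv_join_ne_nil (a : List Char) (rest : List (List Char)) (ha : a ≠ []) :
    PySem.Chars.join ['/'] (a :: rest) ≠ [] := by
  rw [pv_join_cons]
  intro h
  rcases List.append_eq_nil_iff.mp h with ⟨h1, _⟩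
  exact ha h1

theorem pvFirstSeg_join (a : List Char) (rest : List (List Char)) (ha : '/' ∉ a) :
    pvFirstSeg (PySem.Chars.join ['/'] (a :: rest)) = a := by
  rw [pv_join_cons]
  by_cases hr : rest = []
  · rw [if_pos hr, List.append_nil]; exact pvFirstSeg_no_slash a ha
  · rw [if_neg hr]; exact pvFirstSeg_append_slash a _ ha

theorem pv_join_getLast (segs : List (List Char)) (h : ∀ x ∈ segs, x ≠ [] ∧ '/' ∉ x)
    (hne : segs ≠ []) :
    ∃ c, (PySem.Chars.join ['/'] segs).getLast? = some c ∧ c ≠ '/' := by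
  induction segs with
  | nil => exact absurd rfl hne
  | cons a rest ih =>
    rw [pv_join_cons]
    by_cases hr : rest = []
    · rw [if_pos hr, List.append_nil]
      have ha := h a (by simp)
      rcases (List.eq_nil_or_concat a).resolve_left ha.1 with ⟨t, c, rfl⟩
      refine ⟨c, by simp, ?_⟩
      intro hc
      exact ha.2 (by simp [hc])
    · rw [if_neg hr]
      rcases ih (fun x hx => h x (List.mem_cons_of_mem _ hx)) hr with ⟨c, hc1, hc2⟩
      refine ⟨c, ?_, hc2⟩
      have hsplit : a ++ '/' :: PySem.Chars.join ['/'] rest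
          = (a ++ ['/']) ++ PySem.Chars.join ['/'] rest := by simp
      rw [hsplit, List.getLast?_append, hc1]
      rfl

theorem pv_join_not_endswith (segs : List (List Char)) (h : ∀ x ∈ segs, x ≠ [] ∧ '/' ∉ x)
    (hne : segs ≠ []) :
    PySem.Chars.endswith (PySem.Chars.join ['/'] segs) ['/'] = false := by
  rcases pv_join_getLast segs h hne with ⟨c, hc1, hc2⟩
  rw [Bool.eq_false_iff]
  intro hend
  rcases (PySem.Chars.endswith_iff _ _).mp hend with ⟨u, hu⟩
  rw [← hu, List.getLast?_append] at hc1
  simp at hc1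
  exact hc2 hc1.symm

theorem pv_join_ne_dot (a : List Char) (rest : List (List Char))
    (ha : a ≠ ['.']) : PySem.Chars.join ['/'] (a :: rest) ≠ ['.'] := by
  rw [pv_join_cons]
  by_cases hr : rest = []
  · rw [if_pos hr, List.append_nil]; exact ha
  · rw [if_neg hr]
    intro h
    have hmem : '/' ∈ a ++ '/' :: PySem.Chars.join ['/'] rest := by simp
    rw [h] at hmem
    simp at hmem

-- A's whole reserved-path loop, on a clean nonempty segment list, tests only the head segment.
theorem pv_loopA_eq (a : List Char) (rest : List (List Char))
    (ha1 : a ≠ []) (ha2 : '/' ∉ a) :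
    pvLoopA (PySem.Chars.join ['/'] (a :: rest)) pvReservedA = (a == "atlas-state".toList) := by
  have hfs : pvFirstSeg (PySem.Chars.join ['/'] (a :: rest)) = a := pvFirstSeg_join a rest ha2
  have hn1 : pvNormalize ("atlas-state".toList) = "atlas-state".toList := by decide
  have hn2 : pvNormalize ("atlas-state/host-tasks".toList) = "atlas-state/host-tasks".toList := by
    decide
  simp only [pvLoopA, pvReservedA, hn1, hn2]
  by_cases hA : a = "atlas-state".toList
  · subst hA
    by_cases hr : rest = []
    · have hJ : PySem.Chars.join ['/'] ("atlas-state".toList :: rest) = "atlas-state".toList := by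
        rw [pv_join_cons, if_pos hr, List.append_nil]
      rw [if_pos hJ]
      simp
    · have hsw : PySem.Chars.startswith (PySem.Chars.join ['/'] ("atlas-state".toList :: rest))
          ("atlas-state".toList ++ ['/']) = true := by
        rw [PySem.Chars.startswith_iff]
        exact ⟨PySem.Chars.join ['/'] rest, by rw [pv_join_cons, if_neg hr]; simp⟩
      split_ifs <;> simp_all
  · have c1 : PySem.Chars.join ['/'] (a :: rest) ≠ "atlas-state".toList := by
      intro h
      exact hA (by rw [← hfs, h]; decide)
    have c2 : PySem.Chars.startswith (PySem.Chars.join ['/'] (a :: rest))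
        ("atlas-state".toList ++ ['/']) = false := by
      rw [Bool.eq_false_iff]
      intro h
      rcases (PySem.Chars.startswith_iff _ _).mp h with ⟨u, hu⟩
      apply hA
      rw [← hfs, ← hu, pvFirstSeg_append_of_mem _ _ (by simp)]
      decide
    have c3 : PySem.Chars.startswith ("atlas-state".toList)
        (PySem.Chars.join ['/'] (a :: rest) ++ ['/']) = false := by
      rw [Bool.eq_false_iff]
      intro h
      have hpre := (PySem.Chars.startswith_iff _ _).mp h
      have : '/' ∈ "atlas-state".toList := hpre.subset (by simp)
      simp at this
    have c4 : PySem.Chars.join ['/'] (a :: rest) ≠ "atlas-state/host-tasks".toList := by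
      intro h
      exact hA (by rw [← hfs, h]; decide)
    have c5 : PySem.Chars.startswith (PySem.Chars.join ['/'] (a :: rest))
        ("atlas-state/host-tasks".toList ++ ['/']) = false := by
      rw [Bool.eq_false_iff]
      intro h
      rcases (PySem.Chars.startswith_iff _ _).mp h with ⟨u, hu⟩
      apply hA
      rw [← hfs, ← hu, pvFirstSeg_append_of_mem _ _ (by simp)]
      decide
    have c6 : PySem.Chars.startswith ("atlas-state/host-tasks".toList)
        (PySem.Chars.join ['/'] (a :: rest) ++ ['/']) = false := by
      rw [Bool.eq_false_iff]
      intro h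
      rcases (PySem.Chars.startswith_iff _ _).mp h with ⟨u, hu⟩
      apply hA
      have : pvFirstSeg ("atlas-state/host-tasks".toList)
          = pvFirstSeg (PySem.Chars.join ['/'] (a :: rest) ++ ['/']) := by
        rw [← hu, pvFirstSeg_append_of_mem _ _ (by simp)]
      rw [pvFirstSeg_concat_slash, hfs] at this
      rw [← this]
      decide
    rw [if_neg c1, c2]
    simp only [Bool.false_eq_true, if_false]
    rw [c3]
    simp only [Bool.false_eq_true, if_false]
    rw [if_neg c4, c5]
    simp only [Bool.false_eq_true, if_false]
    rw [c6]
    simp only [Bool.false_eq_true, if_false]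
    have hf : (a == "atlas-state".toList) = false := by
      rw [beq_eq_false_iff_ne]
      exact hA
    rw [hf]

-- ===== VERDICT (by name: the statement is the Claim_ definition above) =====
theorem collides_with_reserved_path_spec : Claim_equal_collides_with_reserved_path := by
  intro up _
  unfold Spec_collides_with_reserved_path
  by_cases h0 : up.toList = []
  · simp [collides_with_reserved_path, collides_with_reserved_path_alt, h0]
  · have hparts := pv_foldl_filter (PySem.Chars.splitOn up.toList ['/']) []
    rw [List.nil_append] at hparts
    have hclean : ∀ x ∈ (PySem.Chars.splitOn up.toList ['/']).filter
        (fun p => !(p == [] || p == ['.'])), x ≠ [] ∧ '/' ∉ x ∧ x ≠ ['.'] := by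
      intro x hx
      rcases List.mem_filter.mp hx with ⟨hmem, hp⟩
      simp at hp
      exact ⟨hp.1, pv_splitOn_no_slash _ x hmem, hp.2⟩
    simp only [collides_with_reserved_path, collides_with_reserved_path_alt, pvNormalize,
      if_neg h0]
    rw [hparts, pv_firstRealSeg_filter]
    cases hs : (PySem.Chars.splitOn up.toList ['/']).filter
        (fun p => !(p == [] || p == ['.'])) with
    | nil => simp [PySem.Chars.join, List.intercalate]
    | cons a rest =>
      rw [hs] at hclean
      obtain ⟨ha1, ha2, ha3⟩ := hclean a (by simp)
      have hrest : ∀ x ∈ (a :: rest), x ≠ [] ∧ '/' ∉ x :=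
        fun x hx => ⟨(hclean x hx).1, (hclean x hx).2.1⟩
      have hne := pv_join_ne_nil a rest ha1
      have hend := pv_join_not_endswith (a :: rest) hrest (by simp)
      have hdot := pv_join_ne_dot a rest ha3
      rw [if_neg hne, hend]
      simp only [Bool.and_false, Bool.false_eq_true, if_false]
      rw [if_neg hdot, pv_loopA_eq a rest ha1 ha2]
      rfl
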